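-- pv_equiv track=rewrite | github.com/jackmusick/bifrost-workspace-community | modules/microsoft/gdap.py | find_best_relationship
-- ===== SOURCE A (Python) =====
-- from typing import Any
--
-- TEMPLATE_RELATIONSHIP_ID = "c6da307c-f1be-48eb-8b01-6e20a09df0ed-fc8fef79-d325-497b-ab24-0f878ee59520"
--
-- def find_best_relationship(
--     relationships: list[dict[str, Any]],
-- ) -> dict[str, Any] | None:
--     """
--     Find the best relationship from a list (prefer active > approvalPending > created).
--
--     Excludes the template relationship (TEMPLATE_RELATIONSHIP_ID).
--     Returns None if no valid relationship found.
--     """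
--     priority = {"active": 0, "approved": 1, "approvalPending": 2, "created": 3}
--     valid = [
--         r for r in relationships
--         if r.get("status") in priority and r.get("id") != TEMPLATE_RELATIONSHIP_ID
--     ]
--     if not valid:
--         return None
--     valid.sort(key=lambda r: priority.get(r.get("status", ""), 99))
--     return valid[0]
-- ===== SOURCE B (Python) =====
-- TEMPLATE_RELATIONSHIP_ID = "c6da307c-f1be-48eb-8b01-6e20a09df0ed-fc8fef79-d325-497b-ab24-0f878ee59520"
--
-- def find_best_relationship(relationships):
--     priority = {"active": 0, "approved": 1, "approvalPending": 2, "created": 3}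
--     best = None  # (relationship, its priority); first occurrence wins ties
--     for r in relationships:
--         if r.get("id") == TEMPLATE_RELATIONSHIP_ID:
--             continue
--         p = priority.get(r.get("status"))
--         if p is None:
--             continue
--         if best is None or p < best[1]:
--             best = (r, p)
--     return None if best is None else best[0]
-- ===== Notes on version B (the rewrite author's own statement) =====
-- stated objective: alternative
-- what changed: Replaces A's filter-then-stable-sort-and-take-first with a single linear pass that keeps the running best (strict '<' preserves first-occurrence tie-breaking) and skips the template id and unknown statuses inline.
import Mathlib
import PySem

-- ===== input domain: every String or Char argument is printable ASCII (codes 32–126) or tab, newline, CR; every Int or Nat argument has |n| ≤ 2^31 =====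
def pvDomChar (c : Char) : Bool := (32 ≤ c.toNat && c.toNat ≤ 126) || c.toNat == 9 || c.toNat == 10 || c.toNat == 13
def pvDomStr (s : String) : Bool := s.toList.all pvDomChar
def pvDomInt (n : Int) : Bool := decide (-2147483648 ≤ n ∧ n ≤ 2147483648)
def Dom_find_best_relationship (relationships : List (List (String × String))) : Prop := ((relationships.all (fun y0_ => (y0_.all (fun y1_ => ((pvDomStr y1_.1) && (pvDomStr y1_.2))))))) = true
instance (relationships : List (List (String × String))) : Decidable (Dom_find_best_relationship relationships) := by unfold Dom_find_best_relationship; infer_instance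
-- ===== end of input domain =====

-- B replaces A's filter + stable sort + take-first by one linear pass keeping the running best (first occurrence wins ties).

-- shared module-level constants
def pvTemplateId : String :=
  "c6da307c-f1be-48eb-8b01-6e20a09df0ed-fc8fef79-d325-497b-ab24-0f878ee59520"

def pvPriority : PySem.Dict String Int :=
  PySem.Dict.mk [("active", 0), ("approved", 1), ("approvalPending", 2), ("created", 3)]

-- ===== PORT A =====
def find_best_relationship (relationships : List (List (String × String))) : Option (List (String × String)) :=
  let valid := relationships.filter (fun r =>
    ((PySem.Dict.get? (PySem.Dict.mk r) "status").elim false (fun s => PySem.Dict.contains pvPriority s))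
      && !(PySem.Dict.get? (PySem.Dict.mk r) "id" == some pvTemplateId))
  if valid = [] then none
  else
    match PySem.List.sorted valid
        (fun r => PySem.Dict.getD pvPriority (PySem.Dict.getD (PySem.Dict.mk r) "status" "") 99) false with
    | [] => none
    | r :: _ => some r

-- ===== PORT B =====
def find_best_relationship_alt (relationships : List (List (String × String))) : Option (List (String × String)) :=
  let best := relationships.foldl (fun best r =>
    if PySem.Dict.get? (PySem.Dict.mk r) "id" == some pvTemplateId then best
    else
      match (PySem.Dict.get? (PySem.Dict.mk r) "status").bind
              (fun s => PySem.Dict.get? pvPriority s) with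
      | none => best
      | some p =>
        match best with
        | none => some (r, p)
        | some (b, pb) => if p < pb then some (r, p) else some (b, pb)) none
  match best with
  | none => none
  | some (b, _) => some b

-- ===== PRECONDITION & SPEC =====
def Spec_find_best_relationship (relationships : List (List (String × String))) (out : Option (List (String × String))) : Prop := out = find_best_relationship_alt relationships
instance (relationships : List (List (String × String))) (out : Option (List (String × String))) : Decidable (Spec_find_best_relationship relationships out) := by unfold Spec_find_best_relationship; infer_instance

-- ===== CLAIM (what is proved, stated in full; the proofs are below) =====
def Claim_equal_find_best_relationship : Prop := ∀ (relationships : List (List (String × String))), Dom_find_best_relationship relationships → Spec_find_best_relationship relationships (find_best_relationship relationships)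

-- ===== LEMMAS AND PROOFS =====

-- A's sort key
def pvKey (r : List (String × String)) : Int :=
  PySem.Dict.getD pvPriority (PySem.Dict.getD (PySem.Dict.mk r) "status" "") 99

-- A's filter predicate
def pvPred (r : List (String × String)) : Bool :=
  ((PySem.Dict.get? (PySem.Dict.mk r) "status").elim false (fun s => PySem.Dict.contains pvPriority s))
    && !(PySem.Dict.get? (PySem.Dict.mk r) "id" == some pvTemplateId)

-- B's step on an element that passes the filter
def pvUpd (best : Option ((List (String × String)) × Int)) (r : List (String × String)) :
    Option ((List (String × String)) × Int) :=
  match best with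
  | none => some (r, pvKey r)
  | some (b, pb) => if pvKey r < pb then some (r, pvKey r) else some (b, pb)

-- B's full step
def pvStep (best : Option ((List (String × String)) × Int)) (r : List (String × String)) :
    Option ((List (String × String)) × Int) :=
  if PySem.Dict.get? (PySem.Dict.mk r) "id" == some pvTemplateId then best
  else
    match (PySem.Dict.get? (PySem.Dict.mk r) "status").bind (fun s => PySem.Dict.get? pvPriority s) with
    | none => best
    | some p =>
      match best with
      | none => some (r, p)
      | some (b, pb) => if p < pb then some (r, p) else some (b, pb)

theorem pvStep_eq (best : Option ((List (String × String)) × Int)) (r : List (String × String)) :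
    pvStep best r = if pvPred r then pvUpd best r else best := by
  unfold pvStep pvPred pvUpd pvKey
  cases hs : PySem.Dict.get? (PySem.Dict.mk r) "status" with
  | none =>
    simp only [Option.elim, Option.bind, Bool.false_and, Bool.false_eq_true, if_false]
    split <;> rfl
  | some s =>
    cases hi : PySem.Dict.get? (PySem.Dict.mk r) "id" == some pvTemplateId with
    | true => simp
    | false =>
      cases hp : PySem.Dict.get? pvPriority s with
      | none =>
        have hc : PySem.Dict.contains pvPriority s = false := by
          rw [PySem.Dict.contains_eq_isSome_get?, hp]; rfl
        simp [hp, hc]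
      | some p =>
        have hc : PySem.Dict.contains pvPriority s = true := by
          rw [PySem.Dict.contains_eq_isSome_get?, hp]; rfl
        have hgd : PySem.Dict.getD (PySem.Dict.mk r) "status" "" = s :=
          PySem.Dict.getD_of_get?_eq_some (d := PySem.Dict.mk r) "" hs
        have hgp : PySem.Dict.getD pvPriority s 99 = p :=
          PySem.Dict.getD_of_get?_eq_some (d := pvPriority) 99 hp
        simp [hp, hc, hgd, hgp]

theorem foldl_step_filter (l : List (List (String × String)))
    (st : Option ((List (String × String)) × Int)) :
    l.foldl pvStep st = (l.filter pvPred).foldl pvUpd st := by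
  induction l generalizing st with
  | nil => rfl
  | cons x l ih =>
    by_cases h : pvPred x = true
    · simp [h, List.foldl_cons, pvStep_eq, ih]
    · simp only [Bool.not_eq_true] at h
      simp [h, List.foldl_cons, pvStep_eq, ih]

-- head of insertBy with the strict-key comparison
theorem head_insertBy (x : List (String × String)) (acc : List (List (String × String))) :
    (PySem.List.insertBy (fun a b => decide (pvKey a < pvKey b)) x acc).head? =
      match acc.head? with
      | none => some x
      | some y => if pvKey x < pvKey y then some x else some y := by
  cases acc with
  | nil => simp [PySem.List.insertBy]
  | cons y t =>
    by_cases h : pvKey x < pvKey y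
    · simp [PySem.List.insertBy, h]
    · simp [PySem.List.insertBy, h]

-- the running-best fold computes the head of the insertion sort, paired with its key
theorem fold_head_inv (l acc : List (List (String × String))) :
    l.foldl pvUpd (acc.head?.map (fun b => (b, pvKey b))) =
      ((l.foldl (fun acc x => PySem.List.insertBy (fun a b => decide (pvKey a < pvKey b)) x acc) acc).head?).map
        (fun b => (b, pvKey b)) := by
  induction l generalizing acc with
  | nil => rfl
  | cons x l ih =>
    simp only [List.foldl_cons]
    rw [← ih]
    congr 1
    rw [head_insertBy]
    cases acc with
    | nil => rfl
    | cons y t =>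
      simp only [List.head?_cons, Option.map_some, pvUpd]
      split_ifs <;> rfl

-- ===== VERDICT (by name: the statement is the Claim_ definition above) =====
theorem find_best_relationship_spec : Claim_equal_find_best_relationship := by
  intro rels _
  unfold Spec_find_best_relationship
  have halt : find_best_relationship_alt rels =
      (match rels.foldl pvStep none with
       | none => none
       | some (b, _) => some b) := rfl
  have ha : find_best_relationship rels =
      (if rels.filter pvPred = [] then none
       else match PySem.List.sorted (rels.filter pvPred) pvKey false with
         | [] => none
         | r :: _ => some r) := rfl
  rw [halt, ha, foldl_step_filter]
  set valid := rels.filter pvPred with hv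
  have hsort : PySem.List.sorted valid pvKey false =
      valid.foldl (fun acc x => PySem.List.insertBy (fun a b => decide (pvKey a < pvKey b)) x acc) [] :=
    PySem.List.sorted_eq_foldl_insertBy valid pvKey
  have hinv := fold_head_inv valid []
  simp only [List.head?_nil, Option.map_none] at hinv
  rw [hinv, ← hsort]
  by_cases hnil : valid = []
  · rw [if_pos hnil, hnil]
    simp [PySem.List.sorted]
  · cases hs : PySem.List.sorted valid pvKey false with
    | nil => exact absurd ((PySem.List.sorted_eq_nil_iff valid pvKey false).mp hs) hnil
    | cons m t =>
      simp [hnil]
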